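-- pv_equiv track=rewrite | github.com/Andrzej-Swietek/AGH-Grafy | lib/utils/sequence_checker.py | is_graphic
-- ===== SOURCE A (Python) =====
-- from typing import List
--
-- def is_graphic(sequence: List[int]) -> bool:
--     """
--     Sprawdza, czy podana sekwencja jest sekwencją graficzną. False dla pustej sekwencji.
--     """
--     if not sequence:
--         return False
--
--     if sum(sequence) % 2:
--         return False
--
--     seq = sequence.copy()
--     seq.sort(reverse=True)
--
--     while True:
--         if all(x == 0 for x in seq):
--             return True
--         if seq[0] >= len(seq) or any(x < 0 for x in seq):
--             return False
--         i=1
--         while i <= seq[0]: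
--             seq[i] -= 1
--             i += 1
--         seq[0] = 0
--         seq.sort(reverse=True)
-- ===== SOURCE B (Python) =====
-- from typing import List
--
-- def merge_desc(a: List[int], b: List[int]) -> List[int]:
--     out = []
--     i = j = 0
--     while i < len(a) and j < len(b):
--         if a[i] >= b[j]:
--             out.append(a[i]); i += 1
--         else:
--             out.append(b[j]); j += 1
--     out.extend(a[i:])
--     out.extend(b[j:])
--     return out
--
-- def is_graphic(sequence: List[int]) -> bool:
--     if not sequence:
--         return False
--     if sum(sequence) % 2:
--         return False
--     seq = sorted(sequence, reverse=True)
--     # invariant: seq is non-increasing; it shrinks by one element each round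
--     while True:
--         if not seq:
--             return True
--         if seq[-1] < 0:
--             return False
--         d = seq[0]
--         if d == 0:
--             return True
--         rest = seq[1:]
--         if d > len(rest):
--             return False
--         # give one edge to each of the next d vertices; the two runs stay
--         # sorted, so a linear merge replaces the full re-sort
--         seq = merge_desc([x - 1 for x in rest[:d]], rest[d:])
-- ===== Notes on version B (the rewrite author's own statement) =====
-- stated objective: alternative
-- what changed: Each Havel-Hakimi round now drops the consumed head instead of zeroing it (the list shrinks instead of accumulating zeros), and order is restored by a linear merge of the two still-sorted runs instead of a full re-sort of the whole list.
import Mathlib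
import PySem

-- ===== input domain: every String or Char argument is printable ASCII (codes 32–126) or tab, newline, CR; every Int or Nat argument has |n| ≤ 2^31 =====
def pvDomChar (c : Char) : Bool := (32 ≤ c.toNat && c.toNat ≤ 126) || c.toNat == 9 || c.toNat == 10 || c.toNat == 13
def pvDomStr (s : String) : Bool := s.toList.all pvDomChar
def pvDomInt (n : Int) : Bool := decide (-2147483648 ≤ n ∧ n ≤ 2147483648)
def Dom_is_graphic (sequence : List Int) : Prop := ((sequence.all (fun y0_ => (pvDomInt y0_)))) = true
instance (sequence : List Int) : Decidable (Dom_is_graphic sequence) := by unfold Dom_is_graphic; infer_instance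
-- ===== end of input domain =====

-- B replaces A's zero-and-resort Havel–Hakimi round by a shrinking round that drops the
-- used vertex and restores order with a linear merge of the two sorted runs (alternative
-- decomposition; same asymptotic cost). Return values agree on all inputs.

-- shared helpers: Python's sorted(·, reverse=True), and the fuel bound that makes
-- the two while-loops total in Lean (each round removes at least one degree unit)
def sortD (l : List Int) : List Int := PySem.List.sorted l (fun x => x) true

def pvMeasure (l : List Int) : Nat := (l.map Int.toNat).sum

-- ===== PORT A =====
-- the while-True loop of A; fuel is only a totality guard, never reached from is_graphic
def hhLoopA : Nat → List Int → Bool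
  | 0, _ => false
  | fuel+1, seq =>
    if seq.all (fun x => x == 0) then true
    else if decide ((seq.length : Int) ≤ seq.headI) || seq.any (fun x => decide (x < 0)) then false
    else hhLoopA fuel (sortD (0 :: ((seq.tail.take seq.headI.toNat).map (fun x => x - 1) ++ seq.tail.drop seq.headI.toNat)))

def is_graphic (sequence : List Int) : Bool :=
  if sequence = [] then false
  else if PySem.Int.mod sequence.sum 2 ≠ 0 then false
  else hhLoopA (pvMeasure sequence + 1) (sortD sequence)

-- ===== PORT B =====
def mergeDesc : List Int → List Int → List Int
  | [], b => b
  | a, [] => a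
  | x :: a, y :: b => if y ≤ x then x :: mergeDesc a (y :: b) else y :: mergeDesc (x :: a) b
  termination_by a b => a.length + b.length

-- the while-True loop of B; fuel is only a totality guard, never reached from is_graphic_alt
def hhLoopB : Nat → List Int → Bool
  | 0, _ => false
  | fuel+1, seq =>
    match seq with
    | [] => true
    | d :: rest =>
      if (d :: rest).getLast (List.cons_ne_nil d rest) < 0 then false
      else if d == 0 then true
      else if decide ((rest.length : Int) < d) then false
      else hhLoopB fuel (mergeDesc ((rest.take d.toNat).map (fun x => x - 1)) (rest.drop d.toNat))

def is_graphic_alt (sequence : List Int) : Bool :=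
  if sequence = [] then false
  else if PySem.Int.mod sequence.sum 2 ≠ 0 then false
  else hhLoopB (pvMeasure sequence + 1) (sortD sequence)

-- ===== PRECONDITION & SPEC =====
def Spec_is_graphic (sequence : List Int) (out : Bool) : Prop := out = is_graphic_alt sequence
instance (sequence : List Int) (out : Bool) : Decidable (Spec_is_graphic sequence out) := by unfold Spec_is_graphic; infer_instance

-- ===== CLAIM (what is proved, stated in full; the proofs are below) =====
def Claim_equal_is_graphic : Prop := ∀ (sequence : List Int), Dom_is_graphic sequence → Spec_is_graphic sequence (is_graphic sequence)

-- ===== LEMMAS AND PROOFS =====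

theorem pvMeasure_perm {l l' : List Int} (h : l.Perm l') : pvMeasure l = pvMeasure l' :=
  List.Perm.sum_eq (h.map Int.toNat)

theorem pvMeasure_append (a b : List Int) : pvMeasure (a ++ b) = pvMeasure a + pvMeasure b := by
  simp [pvMeasure]

theorem pvMeasure_cons (x : Int) (l : List Int) : pvMeasure (x :: l) = x.toNat + pvMeasure l := by
  simp [pvMeasure]

theorem pvMeasure_map_sub (l : List Int) : pvMeasure (l.map (fun x => x - 1)) ≤ pvMeasure l := by
  induction l with
  | nil => simp
  | cons x t ih => simp only [List.map_cons, pvMeasure_cons]; omega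

theorem mergeDesc_perm : ∀ (a b : List Int), (mergeDesc a b).Perm (a ++ b)
  | [], b => by simp [mergeDesc]
  | x :: a, [] => by simp [mergeDesc]
  | x :: a, y :: b => by
    by_cases h : y ≤ x
    · simpa [mergeDesc, h] using (mergeDesc_perm a (y :: b)).cons x
    · simp only [mergeDesc, if_neg h]
      exact ((mergeDesc_perm (x :: a) b).cons y).trans List.perm_middle.symm
  termination_by a b => a.length + b.length

theorem mergeDesc_pairwise : ∀ (a b : List Int),
    a.Pairwise (fun u v => v ≤ u) → b.Pairwise (fun u v => v ≤ u) →
    (mergeDesc a b).Pairwise (fun u v => v ≤ u)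
  | [], b, _, hb => by simpa [mergeDesc] using hb
  | x :: a, [], ha, _ => by simpa [mergeDesc] using ha
  | x :: a, y :: b, ha, hb => by
    obtain ⟨hxa, ha'⟩ := List.pairwise_cons.1 ha
    obtain ⟨hyb, hb'⟩ := List.pairwise_cons.1 hb
    by_cases h : y ≤ x
    · simp only [mergeDesc, if_pos h]
      refine List.pairwise_cons.2 ⟨?_, mergeDesc_pairwise a (y :: b) ha' hb⟩
      intro z hz
      rcases List.mem_append.1 ((mergeDesc_perm a (y :: b)).mem_iff.1 hz) with hz | hz
      · exact hxa z hz
      · rcases List.mem_cons.1 hz with rfl | hz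
        · exact h
        · exact le_trans (hyb z hz) h
    · have hxy : x ≤ y := le_of_not_ge h
      simp only [mergeDesc, if_neg h]
      refine List.pairwise_cons.2 ⟨?_, mergeDesc_pairwise (x :: a) b ha hb'⟩
      intro z hz
      rcases List.mem_append.1 ((mergeDesc_perm (x :: a) b).mem_iff.1 hz) with hz | hz
      · rcases List.mem_cons.1 hz with rfl | hz
        · exact hxy
        · exact le_trans (hxa z hz) hxy
      · exact hyb z hz
  termination_by a b => a.length + b.length

theorem pairwise_last_le : ∀ (l : List Int), l.Pairwise (fun u v => v ≤ u) →
    ∀ (hne : l ≠ []) (x : Int), x ∈ l → l.getLast hne ≤ x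
  | [], _, hne, _, _ => absurd rfl hne
  | [a], _, _, x, hx => by simp at hx; simp [hx]
  | a :: b :: t, h, hne, x, hx => by
    have hlast : (a :: b :: t).getLast hne = (b :: t).getLast (List.cons_ne_nil b t) :=
      List.getLast_cons (List.cons_ne_nil b t)
    rcases List.mem_cons.1 hx with rfl | hx
    · rw [hlast]
      exact (List.pairwise_cons.1 h).1 _ (List.getLast_mem (List.cons_ne_nil b t))
    · rw [hlast]
      exact pairwise_last_le (b :: t) (List.pairwise_cons.1 h).2 (List.cons_ne_nil b t) x hx

theorem sortD_perm (l : List Int) : (sortD l).Perm l :=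
  PySem.List.sorted_perm l (fun x => x) true

theorem sortD_pairwise (l : List Int) : (sortD l).Pairwise (fun u v : Int => v ≤ u) :=
  PySem.List.sorted_pairwise_rev l (fun x => x)

theorem sortD_eq {l m : List Int} (hp : m.Perm l) (hs : m.Pairwise (fun u v : Int => v ≤ u)) :
    sortD l = m :=
  List.eq_of_perm_of_sorted (fun a b _ _ h1 h2 => le_antisymm h2 h1)
    (sortD_pairwise l) hs ((sortD_perm l).trans hp.symm)

theorem hhLoopA_false_of_neg (f : Nat) (l : List Int) (x : Int) (hx : x ∈ l) (hxn : x < 0)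
    (hf : 1 ≤ f) : hhLoopA f l = false := by
  obtain ⟨f', rfl⟩ : ∃ f', f = f' + 1 := ⟨f - 1, by omega⟩
  have h1 : (l.all (fun y => y == 0)) = false := List.all_eq_false.2 ⟨x, hx, by simp; omega⟩
  have h2 : (l.any (fun y => decide (y < 0))) = true := List.any_eq_true.2 ⟨x, hx, by simpa using hxn⟩
  rw [hhLoopA, if_neg (by simp [h1]), if_pos (by simp [h2])]

theorem hhLoopB_cons_false (g' : Nat) (e : Int) (ts : List Int)
    (h : (e :: ts).getLast (List.cons_ne_nil e ts) < 0) : hhLoopB (g' + 1) (e :: ts) = false := by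
  rw [hhLoopB]
  simp [h]

theorem hh_key : ∀ (n : Nat) (t : List Int) (k f g : Nat),
    (t ++ List.replicate k 0).Pairwise (fun u v : Int => v ≤ u) →
    pvMeasure t ≤ n → pvMeasure t < f → pvMeasure t < g →
    hhLoopA f (t ++ List.replicate k 0) = hhLoopB g t := by
  intro n
  induction n using Nat.strong_induction_on with
  | _ n ih =>
  intro t k f g hsort hn hf hg
  obtain ⟨f', rfl⟩ : ∃ f', f = f' + 1 := ⟨f - 1, by omega⟩
  obtain ⟨g', rfl⟩ : ∃ g', g = g' + 1 := ⟨g - 1, by omega⟩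
  cases t with
  | nil =>
    simp only [List.nil_append]
    simp [hhLoopA, hhLoopB]
  | cons d rest =>
    simp only [List.cons_append] at hsort ⊢
    have hd_all : ∀ x ∈ rest ++ List.replicate k (0:Int), x ≤ d := (List.pairwise_cons.1 hsort).1
    have hpt : (d :: rest).Pairwise (fun u v : Int => v ≤ u) :=
      List.Pairwise.sublist ((List.sublist_append_left rest (List.replicate k 0)).cons₂ d) hsort
    have hrest : rest.Pairwise (fun u v : Int => v ≤ u) := (List.pairwise_cons.1 hpt).2
    have hLmem : (d :: rest).getLast (List.cons_ne_nil d rest) ∈ d :: rest :=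
      List.getLast_mem (List.cons_ne_nil d rest)
    rw [hhLoopA, hhLoopB]
    by_cases hneg : (d :: rest).getLast (List.cons_ne_nil d rest) < 0
    · -- some entry is negative: both programs answer False
      have hmem' : (d :: rest).getLast (List.cons_ne_nil d rest) ∈ d :: (rest ++ List.replicate k (0:Int)) := by
        rcases List.mem_cons.1 hLmem with h | h
        · rw [h]; exact List.mem_cons_self
        · exact List.mem_cons_of_mem d (List.mem_append_left _ h)
      have hall : ((d :: (rest ++ List.replicate k (0:Int))).all (fun x => x == 0)) = false := by
        simp only [List.all_eq_false]
        exact ⟨_, hmem', by simp; omega⟩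
      have hany : ((d :: (rest ++ List.replicate k (0:Int))).any (fun x => decide (x < 0))) = true := by
        simp only [List.any_eq_true]
        exact ⟨_, hmem', by simpa using hneg⟩
      simp [hall, hany, hneg]
    · push_neg at hneg
      have hnn : ∀ x ∈ d :: rest, 0 ≤ x :=
        fun x hx => le_trans hneg (pairwise_last_le (d :: rest) hpt (List.cons_ne_nil d rest) x hx)
      by_cases hd0 : d = 0
      · -- the head is zero: everything is zero, both answer True
        subst hd0
        have hall : ((0 :: (rest ++ List.replicate k (0:Int))).all (fun x => x == 0)) = true := by
          simp only [List.all_eq_true]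
          intro x hx
          rcases List.mem_cons.1 hx with rfl | hx
          · simp
          · have h1 := hd_all x hx
            rcases List.mem_append.1 hx with hx | hx
            · have h2 := hnn x (List.mem_cons_of_mem 0 hx)
              simp; omega
            · simp [List.eq_of_mem_replicate hx]
        simp [hall, hneg]
      · have hdpos : 0 < d := lt_of_le_of_ne (hnn d List.mem_cons_self) (Ne.symm hd0)
        have hallf : ((d :: (rest ++ List.replicate k (0:Int))).all (fun x => x == 0)) = false := by
          simp only [List.all_eq_false]
          exact ⟨d, List.mem_cons_self, by simp; omega⟩
        have hanyf : ((d :: (rest ++ List.replicate k (0:Int))).any (fun x => decide (x < 0))) = false := by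
          simp only [List.any_eq_false]
          intro x hx
          rcases List.mem_cons.1 hx with rfl | hx
          · simp; omega
          · rcases List.mem_append.1 hx with hx | hx
            · have := hnn x (List.mem_cons_of_mem d hx); simp; omega
            · simp [List.eq_of_mem_replicate hx]
        have hmeas : pvMeasure (d :: rest) = d.toNat + pvMeasure rest := pvMeasure_cons d rest
        have hf1 : 1 ≤ f' := by omega
        have hg1 : 1 ≤ g' := by omega
        by_cases hlen : (rest.length : Int) < d
        · -- B rejects: the head exceeds the number of remaining vertices
          by_cases hslen : (((d :: (rest ++ List.replicate k (0:Int))).length : Int) ≤ (d :: (rest ++ List.replicate k (0:Int))).headI)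
          · rw [if_neg (by simp [hallf]),
              if_pos (by simp only [Bool.or_eq_true, decide_eq_true_eq]; exact Or.inl hslen)]
            rw [if_neg (not_lt.2 hneg), if_neg (by simpa using hd0), if_pos (by simpa using hlen)]
          · -- A survives the guard but creates a -1, and rejects one round later
            rw [if_neg (by simp [hallf]),
              if_neg (by simp only [hanyf, Bool.or_false, decide_eq_true_eq]; exact hslen)]
            rw [if_neg (not_lt.2 hneg), if_neg (by simpa using hd0), if_pos (by simpa using hlen)]
            have hslen' := not_le.1 hslen
            simp only [List.headI_cons, List.length_cons, List.length_append,
              List.length_replicate] at hslen'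
            have hk1 : rest.length < d.toNat := by omega
            have hdn_le : d.toNat ≤ rest.length + k := by push_cast at hslen'; omega
            simp only [List.headI_cons, List.tail_cons]
            have h0take : (0:Int) ∈ (rest ++ List.replicate k (0:Int)).take d.toNat := by
              rw [List.take_append]
              refine List.mem_append_right _ ?_
              rw [List.take_replicate]
              exact List.mem_replicate.2 ⟨by omega, rfl⟩
            have hm1 : (-1 : Int) ∈ ((rest ++ List.replicate k (0:Int)).take d.toNat).map (fun x => x - 1) :=
              List.mem_map.2 ⟨0, h0take, by norm_num⟩
            exact hhLoopA_false_of_neg f' _ (-1)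
              ((sortD_perm _).mem_iff.2 (List.mem_cons_of_mem 0 (List.mem_append_left _ hm1)))
              (by norm_num) hf1
        · -- both recurse; B's merged list is A's re-sorted list minus the new zero
          have hdle : d ≤ (rest.length : Int) := not_lt.1 hlen
          have hdn_le : d.toNat ≤ rest.length := by omega
          have hdn1 : 1 ≤ d.toNat := by omega
          rw [if_neg (by simp [hallf]),
            if_neg (by
              simp only [hanyf, Bool.or_false, decide_eq_true_eq, List.headI_cons,
                List.length_cons, List.length_append, List.length_replicate, not_le]
              push_cast
              omega)]
          rw [if_neg (not_lt.2 hneg), if_neg (by simpa using hd0),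
            if_neg (by simp only [decide_eq_true_eq]; exact hlen)]
          simp only [List.headI_cons, List.tail_cons]
          have htake : (rest ++ List.replicate k (0:Int)).take d.toNat = rest.take d.toNat :=
            List.take_append_of_le_length hdn_le
          have hdrop : (rest ++ List.replicate k (0:Int)).drop d.toNat = rest.drop d.toNat ++ List.replicate k 0 :=
            List.drop_append_of_le_length hdn_le
          rw [htake, hdrop]
          have hdec : ((rest.take d.toNat).map (fun x => x - 1)).Pairwise (fun u v : Int => v ≤ u) :=
            List.Pairwise.map _ (fun a b h => by omega)
              (List.Pairwise.sublist (List.take_sublist d.toNat rest) hrest)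
          have hdrp : (rest.drop d.toNat).Pairwise (fun u v : Int => v ≤ u) :=
            List.Pairwise.sublist (List.drop_sublist d.toNat rest) hrest
          have ht' := mergeDesc_pairwise _ _ hdec hdrp
          have ht'perm := mergeDesc_perm ((rest.take d.toNat).map (fun x => x - 1)) (rest.drop d.toNat)
          have hm_t' : pvMeasure (mergeDesc ((rest.take d.toNat).map (fun x => x - 1)) (rest.drop d.toNat)) ≤ pvMeasure rest := by
            rw [pvMeasure_perm ht'perm, pvMeasure_append]
            have h1 := pvMeasure_map_sub (rest.take d.toNat)
            have h2 : pvMeasure (rest.take d.toNat) + pvMeasure (rest.drop d.toNat) = pvMeasure rest := by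
              rw [← pvMeasure_append, List.take_append_drop]
            omega
          have hlt : pvMeasure (mergeDesc ((rest.take d.toNat).map (fun x => x - 1)) (rest.drop d.toNat)) < pvMeasure (d :: rest) := by
            rw [hmeas]; omega
          by_cases hposs : ∀ x ∈ mergeDesc ((rest.take d.toNat).map (fun x => x - 1)) (rest.drop d.toNat), 0 ≤ x
          · -- no -1 was created: A's next state is B's next state padded with zeros
            have hsorted' : ((mergeDesc ((rest.take d.toNat).map (fun x => x - 1)) (rest.drop d.toNat)) ++ List.replicate (k+1) 0).Pairwise (fun u v : Int => v ≤ u) := by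
              refine List.pairwise_append.2 ⟨ht', ?_, ?_⟩
              · exact List.pairwise_replicate.2 (Or.inr le_rfl)
              · intro a ha b hb
                rw [List.eq_of_mem_replicate hb]
                exact hposs a ha
            have hperm' : ((mergeDesc ((rest.take d.toNat).map (fun x => x - 1)) (rest.drop d.toNat)) ++ List.replicate (k+1) 0).Perm (0 :: ((rest.take d.toNat).map (fun x => x - 1) ++ (rest.drop d.toNat ++ List.replicate k 0))) := by
              refine (ht'perm.append_right (List.replicate (k+1) (0:Int))).trans ?_
              rw [List.replicate_succ']
              have e1 : (((rest.take d.toNat).map (fun x => x - 1)) ++ rest.drop d.toNat) ++ (List.replicate k (0:Int) ++ [0]) = (((rest.take d.toNat).map (fun x => x - 1)) ++ (rest.drop d.toNat ++ List.replicate k 0)) ++ [0] := by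
                simp [List.append_assoc]
              rw [e1]
              exact List.perm_append_comm
            rw [sortD_eq hperm' hsorted']
            exact ih (pvMeasure (mergeDesc ((rest.take d.toNat).map (fun x => x - 1)) (rest.drop d.toNat)))
              (lt_of_lt_of_le hlt hn) _ (k+1) f' g' hsorted' le_rfl (by omega) (by omega)
          · -- a -1 was created: both reject in the next round
            push_neg at hposs
            obtain ⟨x, hx, hxneg⟩ := hposs
            have hxmem : x ∈ 0 :: ((rest.take d.toNat).map (fun x => x - 1) ++ (rest.drop d.toNat ++ List.replicate k (0:Int))) := by
              have hx2 : x ∈ (rest.take d.toNat).map (fun x => x - 1) ++ rest.drop d.toNat := ht'perm.mem_iff.1 hx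
              rcases List.mem_append.1 hx2 with h | h
              · exact List.mem_cons_of_mem 0 (List.mem_append_left _ h)
              · exact List.mem_cons_of_mem 0 (List.mem_append_right _ (List.mem_append_left _ h))
            obtain ⟨e, ts, het⟩ : ∃ e ts, mergeDesc ((rest.take d.toNat).map (fun x => x - 1)) (rest.drop d.toNat) = e :: ts := by
              cases hmt : mergeDesc ((rest.take d.toNat).map (fun x => x - 1)) (rest.drop d.toNat) with
              | nil => rw [hmt] at hx; simp at hx
              | cons e ts => exact ⟨e, ts, rfl⟩
            obtain ⟨g'', rfl⟩ : ∃ g'', g' = g'' + 1 := ⟨g' - 1, by omega⟩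
            rw [het, hhLoopB_cons_false g'' e ts (by
              have := pairwise_last_le (e :: ts) (het ▸ ht') (List.cons_ne_nil e ts) x (het ▸ hx)
              omega)]
            exact hhLoopA_false_of_neg f' _ x ((sortD_perm _).mem_iff.2 hxmem) hxneg hf1

-- ===== VERDICT (by name: the statement is the Claim_ definition above) =====
theorem is_graphic_spec : Claim_equal_is_graphic := by
  unfold Claim_equal_is_graphic Spec_is_graphic
  intro sequence _
  unfold is_graphic is_graphic_alt
  by_cases h1 : sequence = []
  · simp [h1]
  · rw [if_neg h1, if_neg h1]
    by_cases h2 : PySem.Int.mod sequence.sum 2 ≠ 0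
    · rw [if_pos h2, if_pos h2]
    · rw [if_neg h2, if_neg h2]
      have hmeq : pvMeasure (sortD sequence) = pvMeasure sequence := pvMeasure_perm (sortD_perm sequence)
      have h := hh_key (pvMeasure (sortD sequence)) (sortD sequence) 0
        (pvMeasure sequence + 1) (pvMeasure sequence + 1)
        (by simpa using sortD_pairwise sequence) le_rfl (by omega) (by omega)
      simpa using h
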